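-- pv_equiv track=rewrite | github.com/Matteo-Candi/Master-Thesis | benchmark/Python_formatted.py | calculate
-- ===== SOURCE A (Python) =====
-- def calculate(s):
--     ans = 6
--     for i in range(10):
--         for j in range(10):
--             for k in range(10):
--                 for l in range(10):
--                     for m in range(10):
--                         for n in range(10):
--                             if i + j + k == l + m + n:
--                                 c = 0
--                                 if i != ord(s[0]) - ord('0'):
--                                     c += 1
--                                 if j != ord(s[1]) - ord('0'):
--                                     c += 1
--                                 if k != ord(s[2]) - ord('0'):
--                                     c += 1
--                                 if l != ord(s[3]) - ord('0'):
--                                     c += 1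
--                                 if m != ord(s[4]) - ord('0'):
--                                     c += 1
--                                 if n != ord(s[5]) - ord('0'):
--                                     c += 1
--                                 if c < ans:
--                                     ans = c
--     return ans
-- ===== SOURCE B (Python) =====
-- def calculate(s):
--     def step(dp, d):
--         ndp = []
--         for t in range(28):
--             best = 7
--             for x in range(10):
--                 if t - x >= 0:
--                     v = dp[t - x] + (1 if x != d else 0)
--                     if v < best:
--                         best = v
--             ndp.append(best)
--         return ndp
--
--     def side(a, b, c):
--         dp = [0 if t == 0 else 7 for t in range(28)]
--         dp = step(dp, a)
--         dp = step(dp, b)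
--         dp = step(dp, c)
--         return dp
--
--     def g(i):
--         return ord(s[i]) - ord('0')
--
--     left = side(g(0), g(1), g(2))
--     right = side(g(3), g(4), g(5))
--     ans = left[0] + right[0]
--     for t in range(1, 28):
--         if left[t] + right[t] < ans:
--             ans = left[t] + right[t]
--     return ans
-- ===== Notes on version B (the rewrite author's own statement) =====
-- stated objective: faster
-- what changed: replaced the 10^6 brute-force enumeration of all six-digit tuples by a per-half dynamic program that computes the minimum number of changes to reach each digit-sum 0..27 and then combines the two 28-entry tables
import Mathlib
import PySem

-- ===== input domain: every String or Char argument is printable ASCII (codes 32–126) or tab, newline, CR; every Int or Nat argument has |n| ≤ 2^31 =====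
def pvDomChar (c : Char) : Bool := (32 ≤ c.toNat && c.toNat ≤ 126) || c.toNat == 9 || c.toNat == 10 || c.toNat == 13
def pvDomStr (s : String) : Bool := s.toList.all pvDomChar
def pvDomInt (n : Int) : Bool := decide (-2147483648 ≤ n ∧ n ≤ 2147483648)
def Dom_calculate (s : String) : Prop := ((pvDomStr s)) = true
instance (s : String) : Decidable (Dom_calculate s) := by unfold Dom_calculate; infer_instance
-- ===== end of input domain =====

-- B replaces A's brute-force enumeration of all 10^6 digit tuples by a per-half DP over the 28
-- possible digit sums (faster by a large constant factor; same exact result).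

-- ===== PORT A =====
-- ord(s[i]) - ord('0'); the none case is unreachable under Pre_
def pvOrdDig (s : String) (i : Int) : Int :=
  match PySem.Str.pyGet? s i with
  | some ch => (ch.toNat : Int) - 48
  | none => 0

def calculate (s : String) : Int :=
  (PySem.List.pyRange 0 10 1).foldl (fun ans i =>
    (PySem.List.pyRange 0 10 1).foldl (fun ans j =>
      (PySem.List.pyRange 0 10 1).foldl (fun ans k =>
        (PySem.List.pyRange 0 10 1).foldl (fun ans l =>
          (PySem.List.pyRange 0 10 1).foldl (fun ans m =>
            (PySem.List.pyRange 0 10 1).foldl (fun ans n =>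
              if i + j + k = l + m + n then
                let c : Int := 0
                let c := if i ≠ pvOrdDig s 0 then c + 1 else c
                let c := if j ≠ pvOrdDig s 1 then c + 1 else c
                let c := if k ≠ pvOrdDig s 2 then c + 1 else c
                let c := if l ≠ pvOrdDig s 3 then c + 1 else c
                let c := if m ≠ pvOrdDig s 4 then c + 1 else c
                let c := if n ≠ pvOrdDig s 5 then c + 1 else c
                if c < ans then c else ans
              else ans) ans) ans) ans) ans) ans) 6

-- ===== PORT B =====
def pvStep (dp : List Int) (d : Int) : List Int :=
  (PySem.List.pyRange 0 28 1).foldl (fun ndp t =>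
    ndp ++ [(PySem.List.pyRange 0 10 1).foldl (fun best x =>
      if t - x ≥ 0 then
        let v := PySem.List.pyGetD dp (t - x) 0 + (if x ≠ d then 1 else 0)
        if v < best then v else best
      else best) 7]) []

def pvSide (a b c : Int) : List Int :=
  let dp := (PySem.List.pyRange 0 28 1).map (fun t => if t = 0 then (0 : Int) else 7)
  pvStep (pvStep (pvStep dp a) b) c

def calculate_alt (s : String) : Int :=
  let left := pvSide (pvOrdDig s 0) (pvOrdDig s 1) (pvOrdDig s 2)
  let right := pvSide (pvOrdDig s 3) (pvOrdDig s 4) (pvOrdDig s 5)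
  let ans := PySem.List.pyGetD left 0 0 + PySem.List.pyGetD right 0 0
  (PySem.List.pyRange 1 28 1).foldl (fun ans t =>
    if PySem.List.pyGetD left t 0 + PySem.List.pyGetD right t 0 < ans then
      PySem.List.pyGetD left t 0 + PySem.List.pyGetD right t 0
    else ans) ans

-- ===== PRECONDITION & SPEC =====
-- A reads s[0]..s[5], raising IndexError when len(s) < 6; Pre_ excludes exactly those inputs.
def Pre_calculate (s : String) : Prop := 6 ≤ PySem.Str.len s
instance (s : String) : Decidable (Pre_calculate s) := by unfold Pre_calculate; infer_instance
def pvWitness_calculate : String := "123456"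

def Spec_calculate (s : String) (out : Int) : Prop := out = calculate_alt s
instance (s : String) (out : Int) : Decidable (Spec_calculate s out) := by unfold Spec_calculate; infer_instance

-- ===== CLAIM (what is proved, stated in full; the proofs are below) =====
def Claim_equal_calculate : Prop := ∀ (s : String), Dom_calculate s → Pre_calculate s → Spec_calculate s (calculate s)

-- ===== LEMMAS AND PROOFS =====

-- mismatch cost of choosing digit x at a position whose current digit is d
def pvMis (x d : Int) : Int := if x ≠ d then 1 else 0

lemma pvMis_nonneg (x d : Int) : 0 ≤ pvMis x d := by unfold pvMis; split <;> omega
lemma pvMis_le_one (x d : Int) : pvMis x d ≤ 1 := by unfold pvMis; split <;> omega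

-- folding min over a list
lemma pvFoldMin_le_init (xs : List Int) (a : Int) : xs.foldl min a ≤ a := by
  induction xs generalizing a with
  | nil => simp
  | cons x t ih => exact le_trans (ih (min a x)) (by omega)

lemma pvFoldMin_le_mem (xs : List Int) (a v : Int) (h : v ∈ xs) : xs.foldl min a ≤ v := by
  induction xs generalizing a with
  | nil => simp at h
  | cons x t ih =>
    rcases List.mem_cons.mp h with rfl | h'
    · exact le_trans (pvFoldMin_le_init t (min a v)) (by omega)
    · exact ih (min a x) h'

lemma pvFoldMin_cases (xs : List Int) (a : Int) : xs.foldl min a = a ∨ xs.foldl min a ∈ xs := by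
  induction xs generalizing a with
  | nil => left; rfl
  | cons x t ih =>
    rcases ih (min a x) with h | h
    · by_cases hax : a ≤ x
      · left; rw [List.foldl_cons, h]; omega
      · right
        rw [List.foldl_cons, h]
        have hx : min a x = x := by omega
        rw [hx]; exact List.mem_cons_self
    · right; exact List.mem_cons_of_mem x h

-- nested fold-min flattens to a fold over the concatenation
lemma pvFlatFold (xs : List Int) (F : Int → List Int) (a : Int) :
    xs.foldl (fun a x => (F x).foldl min a) a = (xs.flatMap F).foldl min a := by
  induction xs generalizing a with
  | nil => rfl
  | cons x t ih => simp [List.foldl_append, ih]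

-- generic nesting step: a fold whose body is itself a fold-min flattens
lemma pvLevel (R : List Int) (F : Int → List Int) (f : Int → Int → Int)
    (h : ∀ (a x : Int), x ∈ R → f a x = (F x).foldl min a) (a : Int) :
    R.foldl f a = (R.flatMap F).foldl min a := by
  exact (PySem.List.foldl_congr_mem R f (fun a x => (F x).foldl min a) a h).trans (pvFlatFold R F a)

-- Prop-guard version of the filtered fold-min
lemma pvGuardFoldP (xs : List Int) (p : Int → Prop) [DecidablePred p] (g : Int → Int) (a : Int) :
    xs.foldl (fun a x => if p x then min a (g x) else a) a
      = ((xs.filter (fun x => decide (p x))).map g).foldl min a := by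
  induction xs generalizing a with
  | nil => rfl
  | cons x t ih =>
    by_cases hp : p x
    · simp [hp, ih]
    · simp [hp, ih]

def pvCost3 (d0 d1 d2 x y z : Int) : Int := pvMis x d0 + pvMis y d1 + pvMis z d2

def pvBig (d0 d1 d2 d3 d4 d5 : Int) : List Int :=
  (PySem.List.pyRange 0 10 1).flatMap (fun i =>
    (PySem.List.pyRange 0 10 1).flatMap (fun j =>
      (PySem.List.pyRange 0 10 1).flatMap (fun k =>
        (PySem.List.pyRange 0 10 1).flatMap (fun l =>
          (PySem.List.pyRange 0 10 1).flatMap (fun m =>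
            ((PySem.List.pyRange 0 10 1).filter (fun n => decide (i + j + k = l + m + n))).map
              (fun n => pvCost3 d0 d1 d2 i j k + pvCost3 d3 d4 d5 l m n))))))

-- A's innermost loop, as a fold-min over its candidate list
set_option maxHeartbeats 1000000 in
lemma pvInnerA (s : String) (i j k l m a : Int) :
    (PySem.List.pyRange 0 10 1).foldl (fun ans n =>
        if i + j + k = l + m + n then
          let c : Int := 0
          let c := if i ≠ pvOrdDig s 0 then c + 1 else c
          let c := if j ≠ pvOrdDig s 1 then c + 1 else c
          let c := if k ≠ pvOrdDig s 2 then c + 1 else c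
          let c := if l ≠ pvOrdDig s 3 then c + 1 else c
          let c := if m ≠ pvOrdDig s 4 then c + 1 else c
          let c := if n ≠ pvOrdDig s 5 then c + 1 else c
          if c < ans then c else ans
        else ans) a
      = (((PySem.List.pyRange 0 10 1).filter (fun n => decide (i + j + k = l + m + n))).map
          (fun n => pvCost3 (pvOrdDig s 0) (pvOrdDig s 1) (pvOrdDig s 2) i j k
                    + pvCost3 (pvOrdDig s 3) (pvOrdDig s 4) (pvOrdDig s 5) l m n)).foldl min a := by
  rw [← pvGuardFoldP]
  apply PySem.List.foldl_congr_mem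
  intro a n _
  by_cases h : i + j + k = l + m + n
  · simp only [if_pos h]
    unfold pvCost3 pvMis
    rw [min_def]
    split_ifs <;> omega
  · simp only [if_neg h]

-- A = fold-min over the full candidate list
set_option maxHeartbeats 1000000 in
lemma pvA_norm (s : String) :
    calculate s
      = (pvBig (pvOrdDig s 0) (pvOrdDig s 1) (pvOrdDig s 2)
               (pvOrdDig s 3) (pvOrdDig s 4) (pvOrdDig s 5)).foldl min 6 := by
  unfold calculate pvBig
  apply pvLevel; intro a i _
  apply pvLevel; intro a j _
  apply pvLevel; intro a k _
  apply pvLevel; intro a l _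
  apply pvLevel; intro a m _
  exact pvInnerA s i j k l m a

lemma pvBig_mem_intro (d0 d1 d2 d3 d4 d5 i j k l m n : Int)
    (hi : 0 ≤ i ∧ i < 10) (hj : 0 ≤ j ∧ j < 10) (hk : 0 ≤ k ∧ k < 10)
    (hl : 0 ≤ l ∧ l < 10) (hm : 0 ≤ m ∧ m < 10) (hn : 0 ≤ n ∧ n < 10)
    (hsum : i + j + k = l + m + n) :
    pvCost3 d0 d1 d2 i j k + pvCost3 d3 d4 d5 l m n ∈ pvBig d0 d1 d2 d3 d4 d5 := by
  unfold pvBig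
  refine List.mem_flatMap.mpr ⟨i, PySem.List.mem_pyRange_one.mpr hi, ?_⟩
  refine List.mem_flatMap.mpr ⟨j, PySem.List.mem_pyRange_one.mpr hj, ?_⟩
  refine List.mem_flatMap.mpr ⟨k, PySem.List.mem_pyRange_one.mpr hk, ?_⟩
  refine List.mem_flatMap.mpr ⟨l, PySem.List.mem_pyRange_one.mpr hl, ?_⟩
  refine List.mem_flatMap.mpr ⟨m, PySem.List.mem_pyRange_one.mpr hm, ?_⟩
  exact List.mem_map.mpr ⟨n,
    List.mem_filter.mpr ⟨PySem.List.mem_pyRange_one.mpr hn, by simpa using hsum⟩, rfl⟩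

lemma pvBig_mem_elim (d0 d1 d2 d3 d4 d5 v : Int) (h : v ∈ pvBig d0 d1 d2 d3 d4 d5) :
    ∃ i j k l m n : Int,
      (0 ≤ i ∧ i < 10) ∧ (0 ≤ j ∧ j < 10) ∧ (0 ≤ k ∧ k < 10) ∧
      (0 ≤ l ∧ l < 10) ∧ (0 ≤ m ∧ m < 10) ∧ (0 ≤ n ∧ n < 10) ∧
      i + j + k = l + m + n ∧ v = pvCost3 d0 d1 d2 i j k + pvCost3 d3 d4 d5 l m n := by
  unfold pvBig at h
  simp only [List.mem_flatMap, List.mem_map, List.mem_filter,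
    PySem.List.mem_pyRange_one, decide_eq_true_eq] at h
  obtain ⟨i, hi, j, hj, k, hk, l, hl, m, hm, n, ⟨hn, hsum⟩, rfl⟩ := h
  exact ⟨i, j, k, l, m, n, hi, hj, hk, hl, hm, hn, hsum, rfl⟩

-- B's inner loop (one DP cell)
def pvInner (dp : List Int) (d t : Int) : Int :=
  (PySem.List.pyRange 0 10 1).foldl (fun best x =>
    if t - x ≥ 0 then
      let v := PySem.List.pyGetD dp (t - x) 0 + (if x ≠ d then 1 else 0)
      if v < best then v else best
    else best) 7

lemma pvStep_eq_map (dp : List Int) (d : Int) :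
    pvStep dp d = (PySem.List.pyRange 0 28 1).map (fun t => pvInner dp d t) := by
  unfold pvStep pvInner
  rw [PySem.List.foldl_append_singleton_eq_map]
  rfl

lemma pvStep_get (dp : List Int) (d t : Int) (h0 : 0 ≤ t) (h1 : t < 28) :
    PySem.List.pyGetD (pvStep dp d) t 0 = pvInner dp d t := by
  rw [pvStep_eq_map]
  exact PySem.List.pyGetD_map_pyRange_of_nonneg _ 28 t 0 h0 h1

lemma pvInner_eq (dp : List Int) (d t : Int) :
    pvInner dp d t
      = (((PySem.List.pyRange 0 10 1).filter (fun x => decide (t - x ≥ 0))).map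
          (fun x => PySem.List.pyGetD dp (t - x) 0 + pvMis x d)).foldl min 7 := by
  unfold pvInner
  rw [← pvGuardFoldP]
  apply PySem.List.foldl_congr_mem
  intro a x _
  by_cases h : t - x ≥ 0
  · simp only [if_pos h]
    unfold pvMis
    rw [min_def]
    split_ifs <;> omega
  · simp only [if_neg h]

lemma pvStep_le (dp : List Int) (d t x : Int) (hx0 : 0 ≤ x) (hx1 : x < 10)
    (htx : 0 ≤ t - x) (ht1 : t < 28) :
    PySem.List.pyGetD (pvStep dp d) t 0 ≤ PySem.List.pyGetD dp (t - x) 0 + pvMis x d := by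
  rw [pvStep_get dp d t (by omega) ht1, pvInner_eq]
  apply pvFoldMin_le_mem
  exact List.mem_map.mpr ⟨x,
    List.mem_filter.mpr ⟨PySem.List.mem_pyRange_one.mpr ⟨hx0, hx1⟩, by simpa using htx⟩, rfl⟩

lemma pvStep_cases (dp : List Int) (d t : Int) (h0 : 0 ≤ t) (h1 : t < 28) :
    PySem.List.pyGetD (pvStep dp d) t 0 = 7 ∨
      ∃ x : Int, 0 ≤ x ∧ x < 10 ∧ 0 ≤ t - x ∧
        PySem.List.pyGetD (pvStep dp d) t 0 = PySem.List.pyGetD dp (t - x) 0 + pvMis x d := by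
  rw [pvStep_get dp d t h0 h1, pvInner_eq]
  rcases pvFoldMin_cases _ 7 with h | h
  · left; exact h
  · right
    obtain ⟨x, hx, hval⟩ := List.mem_map.mp h
    obtain ⟨hxr, hxf⟩ := List.mem_filter.mp hx
    obtain ⟨hx0, hx1⟩ := PySem.List.mem_pyRange_one.mp hxr
    exact ⟨x, hx0, hx1, by simpa using hxf, hval.symm⟩

-- the initial DP row
lemma pvDp0_get (t : Int) (h0 : 0 ≤ t) (h1 : t < 28) :
    PySem.List.pyGetD ((PySem.List.pyRange 0 28 1).map (fun t => if t = 0 then (0 : Int) else 7)) t 0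
      = if t = 0 then 0 else 7 :=
  PySem.List.pyGetD_map_pyRange_of_nonneg _ 28 t 0 h0 h1

lemma pvSide_le (a b c x y z : Int)
    (hx : 0 ≤ x ∧ x < 10) (hy : 0 ≤ y ∧ y < 10) (hz : 0 ≤ z ∧ z < 10) :
    PySem.List.pyGetD (pvSide a b c) (x + y + z) 0 ≤ pvMis x a + pvMis y b + pvMis z c := by
  simp only [pvSide]
  have h3 := pvStep_le (pvStep (pvStep ((PySem.List.pyRange 0 28 1).map
      (fun t => if t = 0 then (0 : Int) else 7)) a) b) c (x + y + z) z hz.1 hz.2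
      (by omega) (by omega)
  have e3 : x + y + z - z = x + y := by ring
  rw [e3] at h3
  have h2 := pvStep_le (pvStep ((PySem.List.pyRange 0 28 1).map
      (fun t => if t = 0 then (0 : Int) else 7)) a) b (x + y) y hy.1 hy.2
      (by omega) (by omega)
  have e2 : x + y - y = x := by ring
  rw [e2] at h2
  have h1 := pvStep_le ((PySem.List.pyRange 0 28 1).map
      (fun t => if t = 0 then (0 : Int) else 7)) a x x hx.1 hx.2 (by omega) (by omega)
  have e1 : x - x = (0 : Int) := by ring
  rw [e1] at h1
  have hd := pvDp0_get 0 (by omega) (by omega)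
  rw [if_pos rfl] at hd
  rw [hd] at h1
  omega

lemma pvExistsDigits (t : Int) (h0 : 0 ≤ t) (h1 : t < 28) :
    ∃ x y z : Int, (0 ≤ x ∧ x < 10) ∧ (0 ≤ y ∧ y < 10) ∧ (0 ≤ z ∧ z < 10) ∧ x + y + z = t := by
  refine ⟨t - min t 9 - min (t - min t 9) 9, min (t - min t 9) 9, min t 9, ?_, ?_, ?_, ?_⟩ <;> omega

lemma pvSide_le3 (a b c t : Int) (h0 : 0 ≤ t) (h1 : t < 28) :
    PySem.List.pyGetD (pvSide a b c) t 0 ≤ 3 := by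
  obtain ⟨x, y, z, hx, hy, hz, hs⟩ := pvExistsDigits t h0 h1
  have h := pvSide_le a b c x y z hx hy hz
  rw [hs] at h
  have m1 := pvMis_le_one x a
  have m2 := pvMis_le_one y b
  have m3 := pvMis_le_one z c
  omega

lemma pvSide_att (a b c t : Int) (h0 : 0 ≤ t) (h1 : t < 28) :
    ∃ x y z : Int, (0 ≤ x ∧ x < 10) ∧ (0 ≤ y ∧ y < 10) ∧ (0 ≤ z ∧ z < 10) ∧ x + y + z = t ∧
      PySem.List.pyGetD (pvSide a b c) t 0 = pvMis x a + pvMis y b + pvMis z c := by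
  have hle := pvSide_le3 a b c t h0 h1
  simp only [pvSide] at hle ⊢
  rcases pvStep_cases (pvStep (pvStep ((PySem.List.pyRange 0 28 1).map
      (fun t => if t = 0 then (0 : Int) else 7)) a) b) c t h0 h1 with h7 | ⟨z, hz0, hz1, hzt, hS⟩
  · omega
  · have mz := pvMis_nonneg z c
    have mz1 := pvMis_le_one z c
    rcases pvStep_cases (pvStep ((PySem.List.pyRange 0 28 1).map
        (fun t => if t = 0 then (0 : Int) else 7)) a) b (t - z) hzt (by omega) with
      h7 | ⟨y, hy0, hy1, hyt, hS2⟩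
    · omega
    · have my := pvMis_nonneg y b
      have my1 := pvMis_le_one y b
      rcases pvStep_cases ((PySem.List.pyRange 0 28 1).map
          (fun t => if t = 0 then (0 : Int) else 7)) a (t - z - y) hyt (by omega) with
        h7 | ⟨x, hx0, hx1, hxt, hS1⟩
      · omega
      · have mx := pvMis_nonneg x a
        have hd := pvDp0_get (t - z - y - x) hxt (by omega)
        by_cases hz0' : t - z - y - x = 0
        · rw [if_pos hz0'] at hd
          rw [hd] at hS1
          exact ⟨x, y, z, ⟨hx0, hx1⟩, ⟨hy0, hy1⟩, ⟨hz0, hz1⟩, by omega, by omega⟩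
        · rw [if_neg hz0'] at hd
          rw [hd] at hS1
          omega

-- B = fold-min over the 28 combined sums
lemma pvB_norm (s : String) :
    calculate_alt s
      = ((PySem.List.pyRange 1 28 1).map (fun t =>
            PySem.List.pyGetD (pvSide (pvOrdDig s 0) (pvOrdDig s 1) (pvOrdDig s 2)) t 0
            + PySem.List.pyGetD (pvSide (pvOrdDig s 3) (pvOrdDig s 4) (pvOrdDig s 5)) t 0)).foldl
          min
          (PySem.List.pyGetD (pvSide (pvOrdDig s 0) (pvOrdDig s 1) (pvOrdDig s 2)) 0 0
            + PySem.List.pyGetD (pvSide (pvOrdDig s 3) (pvOrdDig s 4) (pvOrdDig s 5)) 0 0) := by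
  unfold calculate_alt
  rw [List.foldl_map]
  apply PySem.List.foldl_congr_mem
  intro a t _
  rw [min_def]
  split_ifs <;> omega

lemma pvB_le (s : String) (t : Int) (h0 : 0 ≤ t) (h1 : t < 28) :
    calculate_alt s
      ≤ PySem.List.pyGetD (pvSide (pvOrdDig s 0) (pvOrdDig s 1) (pvOrdDig s 2)) t 0
        + PySem.List.pyGetD (pvSide (pvOrdDig s 3) (pvOrdDig s 4) (pvOrdDig s 5)) t 0 := by
  rw [pvB_norm]
  by_cases ht : t = 0
  · subst ht; exact pvFoldMin_le_init _ _
  · apply pvFoldMin_le_mem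
    exact List.mem_map.mpr ⟨t, PySem.List.mem_pyRange_one.mpr ⟨by omega, by omega⟩, rfl⟩

lemma pvB_cases (s : String) :
    ∃ t : Int, 0 ≤ t ∧ t < 28 ∧
      calculate_alt s
        = PySem.List.pyGetD (pvSide (pvOrdDig s 0) (pvOrdDig s 1) (pvOrdDig s 2)) t 0
          + PySem.List.pyGetD (pvSide (pvOrdDig s 3) (pvOrdDig s 4) (pvOrdDig s 5)) t 0 := by
  rw [pvB_norm]
  rcases pvFoldMin_cases _ _ with h | h
  · exact ⟨0, le_rfl, by omega, h⟩
  · obtain ⟨t, ht, hval⟩ := List.mem_map.mp h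
    obtain ⟨ht0, ht1⟩ := PySem.List.mem_pyRange_one.mp ht
    exact ⟨t, by omega, by omega, hval.symm⟩

-- ===== VERDICT (by name: the statement is the Claim_ definition above) =====
theorem calculate_spec : Claim_equal_calculate := by
  intro s _ _
  unfold Spec_calculate
  apply le_antisymm
  · obtain ⟨t, h0, h1, hB⟩ := pvB_cases s
    obtain ⟨x, y, z, hx, hy, hz, hxs, hL⟩ :=
      pvSide_att (pvOrdDig s 0) (pvOrdDig s 1) (pvOrdDig s 2) t h0 h1
    obtain ⟨u, v, w, hu, hv, hw, hus, hR⟩ :=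
      pvSide_att (pvOrdDig s 3) (pvOrdDig s 4) (pvOrdDig s 5) t h0 h1
    rw [pvA_norm, hB, hL, hR]
    have hmem := pvBig_mem_intro (pvOrdDig s 0) (pvOrdDig s 1) (pvOrdDig s 2)
      (pvOrdDig s 3) (pvOrdDig s 4) (pvOrdDig s 5) x y z u v w hx hy hz hu hv hw (by omega)
    have := pvFoldMin_le_mem _ 6 _ hmem
    simpa [pvCost3] using this
  · rw [pvA_norm]
    rcases pvFoldMin_cases (pvBig (pvOrdDig s 0) (pvOrdDig s 1) (pvOrdDig s 2)
        (pvOrdDig s 3) (pvOrdDig s 4) (pvOrdDig s 5)) 6 with h | h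
    · rw [h]
      have hB := pvB_le s 0 le_rfl (by omega)
      have l3 := pvSide_le3 (pvOrdDig s 0) (pvOrdDig s 1) (pvOrdDig s 2) 0 le_rfl (by omega)
      have r3 := pvSide_le3 (pvOrdDig s 3) (pvOrdDig s 4) (pvOrdDig s 5) 0 le_rfl (by omega)
      omega
    · obtain ⟨i, j, k, l, m, n, hi, hj, hk, hl, hm, hn, hsum, hv⟩ :=
        pvBig_mem_elim _ _ _ _ _ _ _ h
      have hBle := pvB_le s (i + j + k) (by omega) (by omega)
      have hLle := pvSide_le (pvOrdDig s 0) (pvOrdDig s 1) (pvOrdDig s 2) i j k hi hj hk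
      have hRle := pvSide_le (pvOrdDig s 3) (pvOrdDig s 4) (pvOrdDig s 5) l m n hl hm hn
      rw [hsum] at hBle hLle
      rw [hv]
      simp only [pvCost3] at *
      omega
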